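-- pv_equiv track=rewrite | github.com/herlinatangor/cp | cp.py | is_valid_hostname_relaxed
-- ===== SOURCE A (Python) =====
-- def is_valid_hostname_relaxed(hostname):
--     """Relaxed hostname validation for credential testing"""
--     if not hostname:
--         return False
--
--     # Basic length check
--     if len(hostname) > 253:
--         return False
--
--     # Split on colon to separate hostname from port
--     host_part = hostname.split(':')[0] if ':' in hostname else hostname
--     port_part = None
--
--     if ':' in hostname:
--         parts = hostname.rsplit(':', 1)
--         if len(parts) == 2 and parts[1].isdigit():
--             host_part = parts[0]
--             port_part = int(parts[1])
--             # Validate port range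
--             if port_part < 1 or port_part > 65535:
--                 return False
--
--     # Check for invalid characters in hostname part (more permissive)
--     import string
--     allowed_chars = string.ascii_letters + string.digits + '.-'
--     if not all(c in allowed_chars for c in host_part):
--         return False
--
--     # Must contain at least one dot (for domain) or be localhost-style
--     if '.' not in host_part and host_part not in ['localhost']:
--         return False
--
--     # Check for consecutive dots
--     if '..' in host_part:
--         return False
--
--     # Check each label in hostname
--     if '.' in host_part:
--         labels = host_part.split('.')
--         for label in labels:
--             if not label:  # Empty label
--                 return False
--             if len(label) > 63:  # Label too long
--                 return False
--
--     return True
-- ===== SOURCE B (Python) =====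
-- def is_valid_hostname_relaxed(hostname):
--     """Relaxed hostname validation for credential testing"""
--     if not hostname:
--         return False
--     if len(hostname) > 253:
--         return False
--     # split off an optional numeric port (same observable behaviour as the original)
--     host_part = hostname
--     if ':' in hostname:
--         head, _, tail = hostname.rpartition(':')
--         if tail.isdigit():
--             host_part = head
--             if not (1 <= int(tail) <= 65535):
--                 return False
--         else:
--             host_part = hostname.split(':')[0]
--     # one character-level state machine over host_part: no split into labels,
--     # no whole-string scans, no substring search; label_len tracks the length of
--     # the label being read, seen_dot whether any separator dot has occurred
--     import string
--     allowed = string.ascii_letters + string.digits + '-'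
--     label_len = 0
--     seen_dot = False
--     for ch in host_part:
--         if ch == '.':
--             if label_len == 0:
--                 return False
--             seen_dot = True
--             label_len = 0
--         elif ch in allowed:
--             label_len += 1
--             if label_len > 63:
--                 return False
--         else:
--             return False
--     if label_len == 0:
--         return False
--     if not seen_dot and host_part != 'localhost':
--         return False
--     return True
-- ===== Notes on version B (the rewrite author's own statement) =====
-- stated objective: alternative
-- what changed: A's three whole-string scans over the host part (allowed-character scan, dot/localhost membership test, '..' substring search) plus a split and a separate label loop are replaced by a single character-level state machine that walks host_part once, tracking only the current label length and a seen-dot flag; B never splits the string into labels at all (the port prologue is restructured around rpartition but behaviour-identical).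
import Mathlib
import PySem

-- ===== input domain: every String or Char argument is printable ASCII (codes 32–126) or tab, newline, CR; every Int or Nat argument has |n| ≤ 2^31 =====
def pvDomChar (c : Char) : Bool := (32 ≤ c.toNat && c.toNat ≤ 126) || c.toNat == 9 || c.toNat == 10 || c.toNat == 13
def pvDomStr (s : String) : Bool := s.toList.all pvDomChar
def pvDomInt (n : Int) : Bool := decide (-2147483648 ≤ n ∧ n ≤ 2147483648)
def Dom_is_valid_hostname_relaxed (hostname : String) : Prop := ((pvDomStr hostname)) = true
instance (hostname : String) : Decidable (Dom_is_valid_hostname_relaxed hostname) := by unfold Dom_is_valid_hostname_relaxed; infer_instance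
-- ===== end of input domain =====

-- B replaces A's three whole-string scans + split + label loop over the host part by one
-- character-level state machine (current label length + seen-dot flag); objective: alternative.

-- string.ascii_letters and string.digits (ASCII, exact)
def pvAsciiLetters : List Char := "abcdefghijklmnopqrstuvwxyzABCDEFGHIJKLMNOPQRSTUVWXYZ".toList
def pvAsciiDigits : List Char := "0123456789".toList
def pvLocalhost : List Char := "localhost".toList

-- exact hand port of cs.rsplit(c, 1) (resp. the head/tail of cs.rpartition(c)) for the case
-- c ∈ cs, the only case either caller reaches
def pvRsplitLast (cs : List Char) (c : Char) : List Char × List Char :=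
  let rev := cs.reverse
  let after := rev.takeWhile (fun x => x ≠ c)
  ((rev.drop (after.length + 1)).reverse, after.reverse)

-- ===== PORT A =====
-- A's prologue: emptiness test, length-253 test, the `':' in hostname` / rsplit(':',1) /
-- isdigit / port-range block; `none` = an early `return False`, `some host_part` = fall through
def pvSplitHostPort (cs : List Char) : Option (List Char) :=
  if cs.isEmpty then none                -- `if not hostname`
  else if 253 < cs.length then none      -- `if len(hostname) > 253`
  else
    -- host_part = hostname.split(':')[0] if ':' in hostname else hostname
    let host0 := if cs.contains ':' then (PySem.Chars.splitOn cs [':']).headD [] else cs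
    if cs.contains ':' then
      let parts := pvRsplitLast cs ':'   -- parts = hostname.rsplit(':', 1); len(parts) == 2 holds since ':' ∈ cs
      if PySem.Chars.strIsdigit parts.2 then
        let port := (PySem.Int.ofChars? parts.2).getD 0   -- int(parts[1]); exact: the isdigit guard makes it succeed
        if port < 1 || 65535 < port then none else some parts.1
      else some host0
    else some host0

-- allowed_chars = string.ascii_letters + string.digits + '.-'
def pvAllowedCharsA : List Char := pvAsciiLetters ++ pvAsciiDigits ++ ('.' :: '-' :: [])

-- A's tail after the port-parsing block: whole-string character scan, dot/localhost test,
-- '..' substring test, then the label loop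
def pvHostCheckA (host_part : List Char) : Bool :=
  if !(host_part.all (fun c => pvAllowedCharsA.contains c)) then false   -- `all(c in allowed_chars …)`
  else if !(host_part.contains '.') && !(host_part == pvLocalhost) then false  -- `not in ['localhost']` = ≠
  else if PySem.Chars.isIn ['.', '.'] host_part then false               -- `'..' in host_part`
  else if host_part.contains '.' then
    (PySem.Chars.splitOn host_part ['.']).all
      (fun label => !label.isEmpty && !(63 < label.length))              -- the `for label in labels` loop
  else true

def is_valid_hostname_relaxed (hostname : String) : Bool :=
  match pvSplitHostPort hostname.toList with
  | none => false
  | some host_part => pvHostCheckA host_part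

-- ===== PORT B =====
-- allowed = string.ascii_letters + string.digits + '-'
def pvAllowedCharsB : List Char := pvAsciiLetters ++ pvAsciiDigits ++ ('-' :: [])

-- B's prologue, restructured around hostname.rpartition(':') as in Source B
def pvHostPartB (cs : List Char) : Option (List Char) :=
  if cs.isEmpty then none
  else if 253 < cs.length then none
  else if cs.contains ':' then
    let pr := pvRsplitLast cs ':'       -- head, _, tail = hostname.rpartition(':'); ':' ∈ cs here
    if PySem.Chars.strIsdigit pr.2 then
      let port := (PySem.Int.ofChars? pr.2).getD 0   -- int(tail); exact under the isdigit guard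
      if !(1 ≤ port && port ≤ 65535) then none else some pr.1
    else some ((PySem.Chars.splitOn cs [':']).headD [])  -- host_part = hostname.split(':')[0]
  else some cs

-- B's state machine: `for ch in host_part` with state (label_len, seen_dot);
-- none = an early `return False` inside the loop
def pvScanB : List Char → Nat → Bool → Option (Nat × Bool)
  | [], label_len, seen_dot => some (label_len, seen_dot)
  | ch :: rest, label_len, seen_dot =>
    if ch = '.' then
      if label_len = 0 then none else pvScanB rest 0 true
    else if pvAllowedCharsB.contains ch then
      if 63 < label_len + 1 then none else pvScanB rest (label_len + 1) seen_dot
    else none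

def is_valid_hostname_relaxed_alt (hostname : String) : Bool :=
  match pvHostPartB hostname.toList with
  | none => false
  | some host_part =>
    match pvScanB host_part 0 false with
    | none => false
    | some (label_len, seen_dot) =>
      if label_len = 0 then false
      else if !seen_dot && host_part ≠ pvLocalhost then false
      else true

-- ===== PRECONDITION & SPEC =====
def Spec_is_valid_hostname_relaxed (hostname : String) (out : Bool) : Prop := out = is_valid_hostname_relaxed_alt hostname
instance (hostname : String) (out : Bool) : Decidable (Spec_is_valid_hostname_relaxed hostname out) := by unfold Spec_is_valid_hostname_relaxed; infer_instance

-- ===== CLAIM (what is proved, stated in full; the proofs are below) =====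
def Claim_equal_is_valid_hostname_relaxed : Prop := ∀ (hostname : String), Dom_is_valid_hostname_relaxed hostname → Spec_is_valid_hostname_relaxed hostname (is_valid_hostname_relaxed hostname)

-- ===== LEMMAS AND PROOFS =====

theorem pvHostPartB_eq (cs : List Char) : pvHostPartB cs = pvSplitHostPort cs := by
  unfold pvHostPartB pvSplitHostPort
  split_ifs <;> simp_all <;> omega

-- proof-side characterization of splitting on the single-character separator '.'
def pvSplitDot : List Char → List (List Char)
  | [] => [[]]
  | c :: rest => if c = '.' then [] :: pvSplitDot rest else (pvSplitDot rest).modifyHead (c :: ·)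

theorem pvSplitOn_go_dot (fuel : Nat) : ∀ (l cur : List Char) (acc : List (List Char)),
    l.length < fuel →
    PySem.Chars.splitOn.go ['.'] fuel l cur acc
      = acc.reverse ++ (pvSplitDot l).modifyHead (fun a => cur.reverse ++ a) := by
  induction fuel with
  | zero => intro l cur acc h; omega
  | succ n ih =>
    intro l cur acc h
    cases l with
    | nil =>
      rw [PySem.Chars.splitOn.go]
      · simp [pvSplitDot]
      · intro hh; omega
    | cons x rest =>
      rw [PySem.Chars.splitOn.go]
      simp only [List.isPrefixOf, Bool.and_true, List.length_cons, List.drop_succ_cons,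
        List.length_nil, List.drop_zero]
      by_cases hx : x = '.'
      · subst hx
        rw [if_pos (by simp)]
        rw [ih rest [] (List.reverse cur :: acc) (by simp at h ⊢; omega)]
        simp only [pvSplitDot, if_pos rfl, List.reverse_cons, List.reverse_nil, List.nil_append,
          List.modifyHead_cons]
        cases pvSplitDot rest <;> simp
      · rw [if_neg (by simpa using fun hh => hx hh.symm)]
        rw [ih rest (x :: cur) acc (by simp at h ⊢; omega)]
        simp only [pvSplitDot, if_neg hx, List.modifyHead_modifyHead]
        congr 1
        congr 1
        funext a
        simp

theorem pvSplitOn_dot (cs : List Char) :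
    PySem.Chars.splitOn cs ['.'] = pvSplitDot cs := by
  unfold PySem.Chars.splitOn
  rw [pvSplitOn_go_dot (cs.length + 1) cs [] [] (by omega)]
  cases hsd : pvSplitDot cs <;> simp

theorem pvSplitDot_ne_nil (cs : List Char) : pvSplitDot cs ≠ [] := by
  cases cs with
  | nil => simp [pvSplitDot]
  | cons x rest =>
    simp only [pvSplitDot]
    split
    · simp
    · intro h
      have := List.length_modifyHead (f := (x :: ·)) (l := pvSplitDot rest)
      rw [h] at this
      have h2 := pvSplitDot_ne_nil rest
      cases hr : pvSplitDot rest with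
      | nil => exact h2 hr
      | cons a t => rw [hr] at this; simp at this

theorem pvSplitDot_no_dot (cs : List Char) (h : '.' ∉ cs) : pvSplitDot cs = [cs] := by
  induction cs with
  | nil => simp [pvSplitDot]
  | cons x rest ih =>
    have hx : x ≠ '.' := by intro hh; exact h (by simp [hh])
    simp only [pvSplitDot, if_neg hx]
    rw [ih (fun hm => h (List.mem_cons_of_mem _ hm))]
    simp

theorem pvSplitDot_len_ge_two (cs : List Char) (h : '.' ∈ cs) :
    2 ≤ (pvSplitDot cs).length := by
  induction cs with
  | nil => simp at h
  | cons x rest ih =>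
    by_cases hx : x = '.'
    · simp only [pvSplitDot, if_pos hx, List.length_cons]
      cases hr : pvSplitDot rest with
      | nil => exact absurd hr (pvSplitDot_ne_nil rest)
      | cons a t => simp
    · have hm : '.' ∈ rest := by rcases List.mem_cons.mp h with h1 | h1; exact absurd h1.symm hx; exact h1
      simp only [pvSplitDot, if_neg hx, List.length_modifyHead]
      exact ih hm

theorem pvSplitDot_labels_no_dot (cs : List Char) :
    ∀ l ∈ pvSplitDot cs, '.' ∉ l := by
  induction cs with
  | nil => simp [pvSplitDot]
  | cons x rest ih =>
    by_cases hx : x = '.'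
    · simp only [pvSplitDot, if_pos hx]
      intro l hl
      rcases List.mem_cons.mp hl with h1 | h1
      · simp [h1]
      · exact ih l h1
    · simp only [pvSplitDot, if_neg hx]
      cases hr : pvSplitDot rest with
      | nil => exact absurd hr (pvSplitDot_ne_nil rest)
      | cons a t =>
        intro l hl
        simp only [List.modifyHead_cons] at hl
        rcases List.mem_cons.mp hl with h1 | h1
        · subst h1
          intro hm
          rcases List.mem_cons.mp hm with h2 | h2
          · exact hx h2.symm
          · exact ih a (by rw [hr]; simp) h2
        · exact ih l (by rw [hr]; simp [h1])

theorem pvSplitDot_all (p : Char → Bool) (hp : p '.' = true) (cs : List Char) :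
    cs.all p = (pvSplitDot cs).all (fun l => l.all p) := by
  induction cs with
  | nil => simp [pvSplitDot]
  | cons x rest ih =>
    by_cases hx : x = '.'
    · subst hx
      simp only [pvSplitDot, if_pos rfl, List.all_cons, hp, Bool.true_and, List.all_nil]
      exact ih
    · simp only [pvSplitDot, if_neg hx, List.all_cons]
      cases hr : pvSplitDot rest with
      | nil => exact absurd hr (pvSplitDot_ne_nil rest)
      | cons a t =>
        rw [hr] at ih
        simp only [List.modifyHead_cons, List.all_cons] at *
        rw [ih]
        simp [Bool.and_assoc]

theorem pvSplitDot_doubledot (cs : List Char) (h : ['.', '.'] <:+: cs) :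
    [] ∈ (pvSplitDot cs).tail := by
  induction cs with
  | nil => simp at h
  | cons x rest ih =>
    rcases List.infix_cons_iff.mp h with hpre | hinf
    · rcases List.cons_prefix_cons.mp hpre with ⟨hx, hpre2⟩
      subst hx
      cases rest with
      | nil => simp at hpre2
      | cons y r =>
        rcases List.cons_prefix_cons.mp hpre2 with ⟨hy, _⟩
        subst hy
        simp [pvSplitDot]
    · have ihm := ih hinf
      by_cases hx : x = '.'
      · simp only [pvSplitDot, if_pos hx, List.tail_cons]
        exact List.mem_of_mem_tail ihm
      · simp only [pvSplitDot, if_neg hx]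
        cases hr : pvSplitDot rest with
        | nil => exact absurd hr (pvSplitDot_ne_nil rest)
        | cons a t =>
          rw [hr] at ihm
          simpa using ihm

theorem pvAllowed_B_eq_A (c : Char) (hc : c ≠ '.') :
    pvAllowedCharsB.contains c = pvAllowedCharsA.contains c := by
  simp only [pvAllowedCharsA, pvAllowedCharsB, List.contains_eq_mem, List.mem_append,
    List.mem_cons, List.not_mem_nil]
  by_cases h1 : c ∈ pvAsciiLetters <;> by_cases h2 : c ∈ pvAsciiDigits <;>
    simp [h1, h2, hc]

-- per-label condition enforced by B's machine
def pvGoodLabel (l : List Char) : Bool :=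
  !l.isEmpty && !decide (63 < l.length) && l.all (fun c => pvAllowedCharsB.contains c)

-- what B's machine computes, in terms of the labels of host_part: the current label of
-- length ll extends the head of pvSplitDot cs, and seen_dot ends true iff sd or a dot occurs
theorem pvScanB_spec (p : Bool) (cs : List Char) : ∀ (ll : Nat) (sd : Bool), ll ≤ 63 →
    (match pvScanB cs ll sd with
     | none => false
     | some (ll', sd') => !decide (ll' = 0) && (sd' || p)) =
    (match pvSplitDot cs with
     | [] => false
     | h0 :: tl =>
       decide (0 < ll + h0.length) && decide (ll + h0.length ≤ 63) &&
       h0.all (fun c => pvAllowedCharsB.contains c) && tl.all pvGoodLabel &&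
       (sd || !tl.isEmpty || p)) := by
  induction cs with
  | nil =>
    intro ll sd hll
    simp only [pvScanB, pvSplitDot]
    simp only [List.length_nil, Nat.add_zero, List.all_nil, List.isEmpty_nil, Bool.and_true,
      Bool.not_true, Bool.false_or]
    simp only [hll, decide_true, Bool.and_true]
    by_cases h0 : ll = 0
    · simp [h0]
    · simp [h0, Nat.pos_of_ne_zero h0]
  | cons c rest ih =>
    intro ll sd hll
    by_cases hc : c = '.'
    · subst hc
      simp only [pvScanB, pvSplitDot, if_pos rfl, if_true]
      by_cases h0 : ll = 0
      · subst h0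
        simp only [if_pos rfl]
        cases hr : pvSplitDot rest with
        | nil => exact absurd hr (pvSplitDot_ne_nil rest)
        | cons a t => simp
      · rw [if_neg h0, ih 0 true (by omega)]
        cases hr : pvSplitDot rest with
        | nil => exact absurd hr (pvSplitDot_ne_nil rest)
        | cons a t =>
          simp only [List.all_cons, List.length_nil, Nat.add_zero, List.isEmpty_cons,
            Bool.not_false, Bool.or_true, Bool.true_or, Bool.and_true]
          have e1 : decide (0 < a.length) = !a.isEmpty := by cases a <;> simp
          have e2 : decide (a.length ≤ 63) = !decide (63 < a.length) := by
            rw [← decide_not]; exact decide_eq_decide.mpr (by omega)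
          simp only [pvGoodLabel, Nat.zero_add, e1, e2]
          simp [Nat.pos_of_ne_zero h0, hll, Bool.and_assoc, Bool.and_comm, Bool.and_left_comm]
    · simp only [pvScanB, if_neg hc]
      by_cases hal : pvAllowedCharsB.contains c = true
      case neg =>
        have hal' : pvAllowedCharsB.contains c = false := by simpa using hal
        have hm : c ∉ pvAllowedCharsB := by simpa [List.contains_eq_mem] using hal'
        simp only [hal', Bool.false_eq_true, if_false, if_neg hc]
        simp only [pvSplitDot, if_neg hc]
        cases hr : pvSplitDot rest with
        | nil => exact absurd hr (pvSplitDot_ne_nil rest)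
        | cons a t =>
          simp only [List.modifyHead_cons, List.all_cons, List.contains_eq_mem]
          simp
          intro _ hcm
          exact absurd hcm hm
      · simp only [hal, if_true]
        by_cases hb : 63 < ll + 1
        · rw [if_pos hb]
          simp only [pvSplitDot, if_neg hc]
          cases hr : pvSplitDot rest with
          | nil => exact absurd hr (pvSplitDot_ne_nil rest)
          | cons a t =>
            simp only [List.modifyHead_cons, List.length_cons]
            simp
            intro h
            exact absurd h (by omega)
        · rw [if_neg hb, ih (ll + 1) sd (by omega)]
          simp only [pvSplitDot, if_neg hc]
          cases hr : pvSplitDot rest with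
          | nil => exact absurd hr (pvSplitDot_ne_nil rest)
          | cons a t =>
            simp only [List.modifyHead_cons, List.length_cons, List.all_cons, hal,
              Bool.true_and]
            have h1 : decide (0 < ll + 1 + a.length) = decide (0 < ll + (a.length + 1)) :=
              decide_eq_decide.mpr (by omega)
            have h2 : decide (ll + 1 + a.length ≤ 63) = decide (ll + (a.length + 1) ≤ 63) :=
              decide_eq_decide.mpr (by omega)
            rw [h1, h2]
            rfl


-- the labels-view of B's tail
def pvHostSpec (h : List Char) : Bool :=
  match pvSplitDot h with
  | [] => false
  | h0 :: tl => pvGoodLabel h0 && tl.all pvGoodLabel && (!tl.isEmpty || h == pvLocalhost)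

theorem pvHostCheckB_eq_spec (h : List Char) :
    (match pvScanB h 0 false with
     | none => false
     | some (label_len, seen_dot) =>
       if label_len = 0 then false
       else if !seen_dot && h ≠ pvLocalhost then false
       else true) = pvHostSpec h := by
  have hs := pvScanB_spec (h == pvLocalhost) h 0 false (by omega)
  have hlhs : (match pvScanB h 0 false with
     | none => false
     | some (ll', sd') => !decide (ll' = 0) && (sd' || h == pvLocalhost)) =
      (match pvScanB h 0 false with
     | none => false
     | some (label_len, seen_dot) =>
       if label_len = 0 then false
       else if !seen_dot && h ≠ pvLocalhost then false
       else true) := by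
    cases pvScanB h 0 false with
    | none => rfl
    | some pr =>
      obtain ⟨ll, sd⟩ := pr
      simp only []
      by_cases h0 : ll = 0
      · simp [h0]
      · by_cases hsd : sd
        · simp [h0, hsd]
        · by_cases hloc : h = pvLocalhost <;> simp [h0, hsd, hloc]
  rw [← hlhs, hs]
  unfold pvHostSpec
  cases hr : pvSplitDot h with
  | nil => rfl
  | cons h0 tl =>
    have e1 : decide (0 < h0.length) = !h0.isEmpty := by cases h0 <;> simp
    have e2 : decide (h0.length ≤ 63) = !decide (63 < h0.length) := by
      rw [← decide_not]; exact decide_eq_decide.mpr (by omega)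
    simp only [pvGoodLabel, Nat.zero_add, e1, e2, Bool.false_or]

-- A's tail equals the same labels-view
theorem pvHostCheckA_eq_spec (h : List Char) : pvHostCheckA h = pvHostSpec h := by
  by_cases hloc : h = pvLocalhost
  · subst hloc; decide
  by_cases hd : '.' ∈ h
  case neg =>
    have hcont : h.contains '.' = false := by simp [List.contains_eq_mem, hd]
    unfold pvHostCheckA pvHostSpec
    rw [pvSplitDot_no_dot h hd]
    simp [hcont, hloc, hd]
  have hcont : h.contains '.' = true := by simp [List.contains_eq_mem, hd]
  have hA : pvHostCheckA h =
      (if !(h.all (fun c => pvAllowedCharsA.contains c)) then false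
       else if PySem.Chars.isIn ['.', '.'] h then false
       else (pvSplitDot h).all (fun label => !label.isEmpty && !decide (63 < label.length))) := by
    unfold pvHostCheckA
    rw [pvSplitOn_dot]
    simp [hcont, hd]
  rw [hA]
  obtain ⟨h0, tl, hr⟩ : ∃ h0 tl, pvSplitDot h = h0 :: tl := by
    cases hx : pvSplitDot h with
    | nil => exact absurd hx (pvSplitDot_ne_nil h)
    | cons a t => exact ⟨a, t, rfl⟩
  have htl : tl ≠ [] := by
    have := pvSplitDot_len_ge_two h hd
    rw [hr] at this
    intro hh; subst hh; simp at this
  have htl' : tl.isEmpty = false := by cases tl <;> simp_all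
  unfold pvHostSpec
  rw [hr]
  simp only [htl', Bool.not_false, Bool.true_or, Bool.and_true]
  cases hall : h.all (fun c => pvAllowedCharsA.contains c) with
  | false =>
    simp only [hall, Bool.not_false, if_true]
    have hsplit := pvSplitDot_all (fun c => pvAllowedCharsA.contains c) (by decide) h
    have hBall : (pvSplitDot h).all (fun l => l.all (fun c => pvAllowedCharsA.contains c)) = false := by
      rw [← hsplit]; exact hall
    rcases List.all_eq_false.mp hBall with ⟨l, hlm, hlb⟩
    rcases List.all_eq_false.mp (Bool.eq_false_iff.mpr hlb) with ⟨c2, hc2m, hc2b⟩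
    have hc2ne : c2 ≠ '.' := fun hc => pvSplitDot_labels_no_dot h l hlm (hc ▸ hc2m)
    have hcB : ¬ (pvAllowedCharsB.contains c2 = true) := by
      rw [pvAllowed_B_eq_A c2 hc2ne]; exact hc2b
    have hgl : pvGoodLabel l = false := by
      unfold pvGoodLabel
      have hx : l.all (fun c => pvAllowedCharsB.contains c) = false :=
        List.all_eq_false.mpr ⟨c2, hc2m, hcB⟩
      simp only [hx, Bool.and_false]
    symm
    rw [hr] at hlm
    rcases List.mem_cons.mp hlm with h1 | h1
    · subst h1; simp [hgl]
    · have hx2 : tl.all pvGoodLabel = false :=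
        List.all_eq_false.mpr ⟨l, h1, by simp [hgl]⟩
      simp [hx2]
  | true =>
    simp only [hall, Bool.not_true, Bool.false_eq_true, if_false]
    have hallLabels : ∀ l ∈ pvSplitDot h, l.all (fun c => pvAllowedCharsB.contains c) = true := by
      have hsplit := pvSplitDot_all (fun c => pvAllowedCharsA.contains c) (by decide) h
      rw [hall] at hsplit
      intro l hlmem
      rw [List.all_eq_true]
      intro c hcmem
      rw [pvAllowed_B_eq_A c (fun hc => pvSplitDot_labels_no_dot h l hlmem (hc ▸ hcmem))]
      exact List.all_eq_true.mp (List.all_eq_true.mp hsplit.symm l hlmem) c hcmem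
    cases hdd : PySem.Chars.isIn ['.', '.'] h with
    | true =>
      simp only [if_true]
      have hmem : [] ∈ tl := by
        have := pvSplitDot_doubledot h ((PySem.Chars.isIn_iff_infix _ _).mp hdd)
        rw [hr] at this; simpa using this
      have : tl.all pvGoodLabel = false :=
        List.all_eq_false.mpr ⟨[], hmem, by simp [pvGoodLabel]⟩
      simp [this]
    | false =>
      simp only [Bool.false_eq_true, if_false]
      simp only [List.all_cons]
      have e1 : ∀ l, l ∈ pvSplitDot h →
          ((!l.isEmpty && !decide (63 < l.length)) = pvGoodLabel l) := by
        intro l hlm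
        unfold pvGoodLabel
        rw [hallLabels l hlm]
        simp
      rw [e1 h0 (by rw [hr]; simp)]
      congr 1
      have e2 : ∀ l ∈ tl, ((!l.isEmpty && !decide (63 < l.length)) = pvGoodLabel l) :=
        fun l hl => e1 l (by rw [hr]; simp [hl])
      rw [Bool.eq_iff_iff]
      simp only [List.all_eq_true]
      exact ⟨fun hA l hl => (e2 l hl) ▸ hA l hl, fun hB l hl => (e2 l hl).symm ▸ hB l hl⟩

-- ===== VERDICT (by name: the statement is the Claim_ definition above) =====
theorem is_valid_hostname_relaxed_spec : Claim_equal_is_valid_hostname_relaxed := by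
  intro hostname _
  unfold Spec_is_valid_hostname_relaxed is_valid_hostname_relaxed is_valid_hostname_relaxed_alt
  rw [pvHostPartB_eq]
  cases pvSplitHostPort hostname.toList with
  | none => rfl
  | some host_part =>
    show pvHostCheckA host_part = _
    rw [pvHostCheckA_eq_spec]
    exact (pvHostCheckB_eq_spec host_part).symm
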